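-- pv_equiv track=rewrite | github.com/JaeMinBird/ML-Project | preprocessor.py | extract_tag_features
-- ===== SOURCE A (Python) =====
-- def extract_tag_features(tags_list):
--     """
--     Extract common features from tags.
--     Returns a dictionary of boolean features indicating presence of certain qualities.
--     """
--     tag_features = {
--         'is_helpful': False,
--         'is_tough': False,
--         'gives_feedback': False,
--         'lots_of_homework': False,
--         'clear_grading': False,
--         'caring': False,
--         'respected': False,
--         'inspirational': False,
--         'skip_class': False,
--         'tough_grader': False,
--         'get_ready_to_read': False
--     }
--
--     # Convert all tags to lowercase for case-insensitive matching
--     lower_tags = [tag.lower() for tag in tags_list]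
--
--     # Check for key phrases in the tags
--     if any(tag in lower_tags for tag in ['helpful', 'super helpful']):
--         tag_features['is_helpful'] = True
--
--     if any(tag in lower_tags for tag in ['tough', 'difficult', 'challenging']):
--         tag_features['is_tough'] = True
--
--     if any('feedback' in tag for tag in lower_tags):
--         tag_features['gives_feedback'] = True
--
--     if any(tag in lower_tags for tag in ['lots of homework', 'heavy workload']):
--         tag_features['lots_of_homework'] = True
--
--     if any(tag in lower_tags for tag in ['clear grading', 'fair grading']):
--         tag_features['clear_grading'] = True
--
--     if any(tag in lower_tags for tag in ['caring', 'compassionate', 'understanding']):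
--         tag_features['caring'] = True
--
--     if any(tag in lower_tags for tag in ['respected', 'respected professor']):
--         tag_features['respected'] = True
--
--     if any(tag in lower_tags for tag in ['inspirational', 'inspiring']):
--         tag_features['inspirational'] = True
--
--     if any(tag in lower_tags for tag in ['skip class', 'skip', 'attendance not mandatory']):
--         tag_features['skip_class'] = True
--
--     if any(tag in lower_tags for tag in ['tough grader', 'hard grader']):
--         tag_features['tough_grader'] = True
--
--     if any(tag in lower_tags for tag in ['get ready to read', 'lots of reading']):
--         tag_features['get_ready_to_read'] = True
--
--     return tag_features
-- ===== SOURCE B (Python) =====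
-- _KEYS = [
--     'is_helpful', 'is_tough', 'gives_feedback', 'lots_of_homework',
--     'clear_grading', 'caring', 'respected', 'inspirational',
--     'skip_class', 'tough_grader', 'get_ready_to_read',
-- ]
--
-- _PHRASE_TO_KEY = {
--     'helpful': 'is_helpful', 'super helpful': 'is_helpful',
--     'tough': 'is_tough', 'difficult': 'is_tough', 'challenging': 'is_tough',
--     'lots of homework': 'lots_of_homework', 'heavy workload': 'lots_of_homework',
--     'clear grading': 'clear_grading', 'fair grading': 'clear_grading',
--     'caring': 'caring', 'compassionate': 'caring', 'understanding': 'caring',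
--     'respected': 'respected', 'respected professor': 'respected',
--     'inspirational': 'inspirational', 'inspiring': 'inspirational',
--     'skip class': 'skip_class', 'skip': 'skip_class',
--     'attendance not mandatory': 'skip_class',
--     'tough grader': 'tough_grader', 'hard grader': 'tough_grader',
--     'get ready to read': 'get_ready_to_read', 'lots of reading': 'get_ready_to_read',
-- }
--
-- def extract_tag_features(tags_list):
--     """Single pass over the tags with an inverted phrase->feature index."""
--     features = {key: False for key in _KEYS}
--     for tag in tags_list:
--         t = tag.lower()
--         key = _PHRASE_TO_KEY.get(t)
--         if key is not None:
--             features[key] = True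
--         if 'feedback' in t:
--             features['gives_feedback'] = True
--     return features
-- ===== Notes on version B (the rewrite author's own statement) =====
-- stated objective: faster
-- what changed: Replaces A's eleven separate any(...)-membership scans of the lowered tag list (one per feature, 23 trigger phrases in total) by a single pass over the tags with an inverted phrase-to-feature dictionary, folding the substring-based gives_feedback check into the same pass.
import Mathlib
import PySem

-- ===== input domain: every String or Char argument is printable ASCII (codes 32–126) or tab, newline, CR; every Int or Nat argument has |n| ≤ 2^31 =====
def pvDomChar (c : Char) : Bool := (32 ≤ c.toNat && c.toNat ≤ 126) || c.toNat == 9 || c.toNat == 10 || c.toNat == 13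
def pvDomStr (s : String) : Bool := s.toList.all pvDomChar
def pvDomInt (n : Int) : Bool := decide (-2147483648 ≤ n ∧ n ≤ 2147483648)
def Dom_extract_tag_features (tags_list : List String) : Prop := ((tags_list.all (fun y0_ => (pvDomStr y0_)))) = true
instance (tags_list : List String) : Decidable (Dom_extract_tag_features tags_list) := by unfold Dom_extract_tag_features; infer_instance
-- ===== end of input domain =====

-- B replaces A's eleven separate membership scans by a single pass over the tags
-- with an inverted phrase→feature index (objective: alternative decomposition).


-- ===== PORT A =====
-- dict → assoc list in insertion order; `d[k] = v` with k already a key overwrites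
-- in place (exact Python dict-assignment semantics, append if absent — here every
-- assigned key is present in the initial dict).
def pvAssign (d : List (String × Bool)) (k : String) (v : Bool) : List (String × Bool) :=
  match d with
  | [] => [(k, v)]
  | (k', v') :: rest => if k' == k then (k', v) :: rest else (k', v') :: pvAssign rest k v

def extract_tag_features (tags_list : List String) : List (String × Bool) :=
  let tag_features : List (String × Bool) :=
    [("is_helpful", false), ("is_tough", false), ("gives_feedback", false),
     ("lots_of_homework", false), ("clear_grading", false), ("caring", false),
     ("respected", false), ("inspirational", false), ("skip_class", false),
     ("tough_grader", false), ("get_ready_to_read", false)]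
  let lower_tags := tags_list.map PySem.Str.lower
  let tag_features := if ["helpful", "super helpful"].any (fun tag => lower_tags.contains tag) then pvAssign tag_features "is_helpful" true else tag_features
  let tag_features := if ["tough", "difficult", "challenging"].any (fun tag => lower_tags.contains tag) then pvAssign tag_features "is_tough" true else tag_features
  let tag_features := if lower_tags.any (fun tag => PySem.Str.isIn "feedback" tag) then pvAssign tag_features "gives_feedback" true else tag_features
  let tag_features := if ["lots of homework", "heavy workload"].any (fun tag => lower_tags.contains tag) then pvAssign tag_features "lots_of_homework" true else tag_features
  let tag_features := if ["clear grading", "fair grading"].any (fun tag => lower_tags.contains tag) then pvAssign tag_features "clear_grading" true else tag_features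
  let tag_features := if ["caring", "compassionate", "understanding"].any (fun tag => lower_tags.contains tag) then pvAssign tag_features "caring" true else tag_features
  let tag_features := if ["respected", "respected professor"].any (fun tag => lower_tags.contains tag) then pvAssign tag_features "respected" true else tag_features
  let tag_features := if ["inspirational", "inspiring"].any (fun tag => lower_tags.contains tag) then pvAssign tag_features "inspirational" true else tag_features
  let tag_features := if ["skip class", "skip", "attendance not mandatory"].any (fun tag => lower_tags.contains tag) then pvAssign tag_features "skip_class" true else tag_features
  let tag_features := if ["tough grader", "hard grader"].any (fun tag => lower_tags.contains tag) then pvAssign tag_features "tough_grader" true else tag_features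
  let tag_features := if ["get ready to read", "lots of reading"].any (fun tag => lower_tags.contains tag) then pvAssign tag_features "get_ready_to_read" true else tag_features
  tag_features

-- ===== PORT B =====
def pvKeys : List String :=
  ["is_helpful", "is_tough", "gives_feedback", "lots_of_homework",
   "clear_grading", "caring", "respected", "inspirational",
   "skip_class", "tough_grader", "get_ready_to_read"]

def pvPhraseToKey : List (String × String) :=
  [("helpful", "is_helpful"), ("super helpful", "is_helpful"),
   ("tough", "is_tough"), ("difficult", "is_tough"), ("challenging", "is_tough"),
   ("lots of homework", "lots_of_homework"), ("heavy workload", "lots_of_homework"),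
   ("clear grading", "clear_grading"), ("fair grading", "clear_grading"),
   ("caring", "caring"), ("compassionate", "caring"), ("understanding", "caring"),
   ("respected", "respected"), ("respected professor", "respected"),
   ("inspirational", "inspirational"), ("inspiring", "inspirational"),
   ("skip class", "skip_class"), ("skip", "skip_class"),
   ("attendance not mandatory", "skip_class"),
   ("tough grader", "tough_grader"), ("hard grader", "tough_grader"),
   ("get ready to read", "get_ready_to_read"), ("lots of reading", "get_ready_to_read")]

-- `_PHRASE_TO_KEY.get(t)`: first-match assoc lookup (exact: dict keys are distinct)
def pvGet (d : List (String × String)) (k : String) : Option String :=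
  match d with
  | [] => none
  | (k', v) :: rest => if k == k' then some v else pvGet rest k

-- the body of B's `for tag in tags_list:` loop
def pvStepB (features : List (String × Bool)) (tag : String) : List (String × Bool) :=
  let t := PySem.Str.lower tag
  let features :=
    match pvGet pvPhraseToKey t with
    | some key => pvAssign features key true
    | none => features
  if PySem.Str.isIn "feedback" t then pvAssign features "gives_feedback" true else features

def extract_tag_features_alt (tags_list : List String) : List (String × Bool) :=
  tags_list.foldl pvStepB (pvKeys.map (fun key => (key, false)))

-- ===== PRECONDITION & SPEC =====
def Spec_extract_tag_features (tags_list : List String) (out : List (String × Bool)) : Prop := out = extract_tag_features_alt tags_list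
instance (tags_list : List String) (out : List (String × Bool)) : Decidable (Spec_extract_tag_features tags_list out) := by unfold Spec_extract_tag_features; infer_instance

-- ===== CLAIM (what is proved, stated in full; the proofs are below) =====
def Claim_equal_extract_tag_features : Prop := ∀ (tags_list : List String), Dom_extract_tag_features tags_list → Spec_extract_tag_features tags_list (extract_tag_features tags_list)

-- ===== LEMMAS AND PROOFS =====

/-- The shape every feature dict in either program has: the eleven fixed keys. -/
def pvMk (b1 b2 b3 b4 b5 b6 b7 b8 b9 b10 b11 : Bool) : List (String × Bool) :=
  [("is_helpful", b1), ("is_tough", b2), ("gives_feedback", b3),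
   ("lots_of_homework", b4), ("clear_grading", b5), ("caring", b6),
   ("respected", b7), ("inspirational", b8), ("skip_class", b9),
   ("tough_grader", b10), ("get_ready_to_read", b11)]

set_option maxHeartbeats 1000000 in
/-- B's loop step on a dict of the canonical shape. -/
theorem pvStepB_mk (t : String) (b1 b2 b3 b4 b5 b6 b7 b8 b9 b10 b11 : Bool) :
    pvStepB (pvMk b1 b2 b3 b4 b5 b6 b7 b8 b9 b10 b11) t =
      pvMk (b1 || (PySem.Str.lower t == "helpful" || PySem.Str.lower t == "super helpful"))
           (b2 || (PySem.Str.lower t == "tough" || PySem.Str.lower t == "difficult" || PySem.Str.lower t == "challenging"))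
           (b3 || PySem.Str.isIn "feedback" (PySem.Str.lower t))
           (b4 || (PySem.Str.lower t == "lots of homework" || PySem.Str.lower t == "heavy workload"))
           (b5 || (PySem.Str.lower t == "clear grading" || PySem.Str.lower t == "fair grading"))
           (b6 || (PySem.Str.lower t == "caring" || PySem.Str.lower t == "compassionate" || PySem.Str.lower t == "understanding"))
           (b7 || (PySem.Str.lower t == "respected" || PySem.Str.lower t == "respected professor"))
           (b8 || (PySem.Str.lower t == "inspirational" || PySem.Str.lower t == "inspiring"))
           (b9 || (PySem.Str.lower t == "skip class" || PySem.Str.lower t == "skip" || PySem.Str.lower t == "attendance not mandatory"))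
           (b10 || (PySem.Str.lower t == "tough grader" || PySem.Str.lower t == "hard grader"))
           (b11 || (PySem.Str.lower t == "get ready to read" || PySem.Str.lower t == "lots of reading")) := by
  by_cases h1 : PySem.Str.lower t = "helpful"
  · have hfb : PySem.Chars.isIn ['f', 'e', 'e', 'd', 'b', 'a', 'c', 'k'] ['h', 'e', 'l', 'p', 'f', 'u', 'l'] = false := by decide
    simp [pvStepB, pvGet, pvPhraseToKey, pvMk, pvAssign, h1, hfb]
  by_cases h2 : PySem.Str.lower t = "super helpful"
  · have hfb : PySem.Chars.isIn ['f', 'e', 'e', 'd', 'b', 'a', 'c', 'k'] ['s', 'u', 'p', 'e', 'r', ' ', 'h', 'e', 'l', 'p', 'f', 'u', 'l'] = false := by decide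
    simp [pvStepB, pvGet, pvPhraseToKey, pvMk, pvAssign, h2, hfb]
  by_cases h3 : PySem.Str.lower t = "tough"
  · have hfb : PySem.Chars.isIn ['f', 'e', 'e', 'd', 'b', 'a', 'c', 'k'] ['t', 'o', 'u', 'g', 'h'] = false := by decide
    simp [pvStepB, pvGet, pvPhraseToKey, pvMk, pvAssign, h3, hfb]
  by_cases h4 : PySem.Str.lower t = "difficult"
  · have hfb : PySem.Chars.isIn ['f', 'e', 'e', 'd', 'b', 'a', 'c', 'k'] ['d', 'i', 'f', 'f', 'i', 'c', 'u', 'l', 't'] = false := by decide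
    simp [pvStepB, pvGet, pvPhraseToKey, pvMk, pvAssign, h4, hfb]
  by_cases h5 : PySem.Str.lower t = "challenging"
  · have hfb : PySem.Chars.isIn ['f', 'e', 'e', 'd', 'b', 'a', 'c', 'k'] ['c', 'h', 'a', 'l', 'l', 'e', 'n', 'g', 'i', 'n', 'g'] = false := by decide
    simp [pvStepB, pvGet, pvPhraseToKey, pvMk, pvAssign, h5, hfb]
  by_cases h6 : PySem.Str.lower t = "lots of homework"
  · have hfb : PySem.Chars.isIn ['f', 'e', 'e', 'd', 'b', 'a', 'c', 'k'] ['l', 'o', 't', 's', ' ', 'o', 'f', ' ', 'h', 'o', 'm', 'e', 'w', 'o', 'r', 'k'] = false := by decide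
    simp [pvStepB, pvGet, pvPhraseToKey, pvMk, pvAssign, h6, hfb]
  by_cases h7 : PySem.Str.lower t = "heavy workload"
  · have hfb : PySem.Chars.isIn ['f', 'e', 'e', 'd', 'b', 'a', 'c', 'k'] ['h', 'e', 'a', 'v', 'y', ' ', 'w', 'o', 'r', 'k', 'l', 'o', 'a', 'd'] = false := by decide
    simp [pvStepB, pvGet, pvPhraseToKey, pvMk, pvAssign, h7, hfb]
  by_cases h8 : PySem.Str.lower t = "clear grading"
  · have hfb : PySem.Chars.isIn ['f', 'e', 'e', 'd', 'b', 'a', 'c', 'k'] ['c', 'l', 'e', 'a', 'r', ' ', 'g', 'r', 'a', 'd', 'i', 'n', 'g'] = false := by decide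
    simp [pvStepB, pvGet, pvPhraseToKey, pvMk, pvAssign, h8, hfb]
  by_cases h9 : PySem.Str.lower t = "fair grading"
  · have hfb : PySem.Chars.isIn ['f', 'e', 'e', 'd', 'b', 'a', 'c', 'k'] ['f', 'a', 'i', 'r', ' ', 'g', 'r', 'a', 'd', 'i', 'n', 'g'] = false := by decide
    simp [pvStepB, pvGet, pvPhraseToKey, pvMk, pvAssign, h9, hfb]
  by_cases h10 : PySem.Str.lower t = "caring"
  · have hfb : PySem.Chars.isIn ['f', 'e', 'e', 'd', 'b', 'a', 'c', 'k'] ['c', 'a', 'r', 'i', 'n', 'g'] = false := by decide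
    simp [pvStepB, pvGet, pvPhraseToKey, pvMk, pvAssign, h10, hfb]
  by_cases h11 : PySem.Str.lower t = "compassionate"
  · have hfb : PySem.Chars.isIn ['f', 'e', 'e', 'd', 'b', 'a', 'c', 'k'] ['c', 'o', 'm', 'p', 'a', 's', 's', 'i', 'o', 'n', 'a', 't', 'e'] = false := by decide
    simp [pvStepB, pvGet, pvPhraseToKey, pvMk, pvAssign, h11, hfb]
  by_cases h12 : PySem.Str.lower t = "understanding"
  · have hfb : PySem.Chars.isIn ['f', 'e', 'e', 'd', 'b', 'a', 'c', 'k'] ['u', 'n', 'd', 'e', 'r', 's', 't', 'a', 'n', 'd', 'i', 'n', 'g'] = false := by decide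
    simp [pvStepB, pvGet, pvPhraseToKey, pvMk, pvAssign, h12, hfb]
  by_cases h13 : PySem.Str.lower t = "respected"
  · have hfb : PySem.Chars.isIn ['f', 'e', 'e', 'd', 'b', 'a', 'c', 'k'] ['r', 'e', 's', 'p', 'e', 'c', 't', 'e', 'd'] = false := by decide
    simp [pvStepB, pvGet, pvPhraseToKey, pvMk, pvAssign, h13, hfb]
  by_cases h14 : PySem.Str.lower t = "respected professor"
  · have hfb : PySem.Chars.isIn ['f', 'e', 'e', 'd', 'b', 'a', 'c', 'k'] ['r', 'e', 's', 'p', 'e', 'c', 't', 'e', 'd', ' ', 'p', 'r', 'o', 'f', 'e', 's', 's', 'o', 'r'] = false := by decide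
    simp [pvStepB, pvGet, pvPhraseToKey, pvMk, pvAssign, h14, hfb]
  by_cases h15 : PySem.Str.lower t = "inspirational"
  · have hfb : PySem.Chars.isIn ['f', 'e', 'e', 'd', 'b', 'a', 'c', 'k'] ['i', 'n', 's', 'p', 'i', 'r', 'a', 't', 'i', 'o', 'n', 'a', 'l'] = false := by decide
    simp [pvStepB, pvGet, pvPhraseToKey, pvMk, pvAssign, h15, hfb]
  by_cases h16 : PySem.Str.lower t = "inspiring"
  · have hfb : PySem.Chars.isIn ['f', 'e', 'e', 'd', 'b', 'a', 'c', 'k'] ['i', 'n', 's', 'p', 'i', 'r', 'i', 'n', 'g'] = false := by decide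
    simp [pvStepB, pvGet, pvPhraseToKey, pvMk, pvAssign, h16, hfb]
  by_cases h17 : PySem.Str.lower t = "skip class"
  · have hfb : PySem.Chars.isIn ['f', 'e', 'e', 'd', 'b', 'a', 'c', 'k'] ['s', 'k', 'i', 'p', ' ', 'c', 'l', 'a', 's', 's'] = false := by decide
    simp [pvStepB, pvGet, pvPhraseToKey, pvMk, pvAssign, h17, hfb]
  by_cases h18 : PySem.Str.lower t = "skip"
  · have hfb : PySem.Chars.isIn ['f', 'e', 'e', 'd', 'b', 'a', 'c', 'k'] ['s', 'k', 'i', 'p'] = false := by decide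
    simp [pvStepB, pvGet, pvPhraseToKey, pvMk, pvAssign, h18, hfb]
  by_cases h19 : PySem.Str.lower t = "attendance not mandatory"
  · have hfb : PySem.Chars.isIn ['f', 'e', 'e', 'd', 'b', 'a', 'c', 'k'] ['a', 't', 't', 'e', 'n', 'd', 'a', 'n', 'c', 'e', ' ', 'n', 'o', 't', ' ', 'm', 'a', 'n', 'd', 'a', 't', 'o', 'r', 'y'] = false := by decide
    simp [pvStepB, pvGet, pvPhraseToKey, pvMk, pvAssign, h19, hfb]
  by_cases h20 : PySem.Str.lower t = "tough grader"
  · have hfb : PySem.Chars.isIn ['f', 'e', 'e', 'd', 'b', 'a', 'c', 'k'] ['t', 'o', 'u', 'g', 'h', ' ', 'g', 'r', 'a', 'd', 'e', 'r'] = false := by decide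
    simp [pvStepB, pvGet, pvPhraseToKey, pvMk, pvAssign, h20, hfb]
  by_cases h21 : PySem.Str.lower t = "hard grader"
  · have hfb : PySem.Chars.isIn ['f', 'e', 'e', 'd', 'b', 'a', 'c', 'k'] ['h', 'a', 'r', 'd', ' ', 'g', 'r', 'a', 'd', 'e', 'r'] = false := by decide
    simp [pvStepB, pvGet, pvPhraseToKey, pvMk, pvAssign, h21, hfb]
  by_cases h22 : PySem.Str.lower t = "get ready to read"
  · have hfb : PySem.Chars.isIn ['f', 'e', 'e', 'd', 'b', 'a', 'c', 'k'] ['g', 'e', 't', ' ', 'r', 'e', 'a', 'd', 'y', ' ', 't', 'o', ' ', 'r', 'e', 'a', 'd'] = false := by decide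
    simp [pvStepB, pvGet, pvPhraseToKey, pvMk, pvAssign, h22, hfb]
  by_cases h23 : PySem.Str.lower t = "lots of reading"
  · have hfb : PySem.Chars.isIn ['f', 'e', 'e', 'd', 'b', 'a', 'c', 'k'] ['l', 'o', 't', 's', ' ', 'o', 'f', ' ', 'r', 'e', 'a', 'd', 'i', 'n', 'g'] = false := by decide
    simp [pvStepB, pvGet, pvPhraseToKey, pvMk, pvAssign, h23, hfb]
  cases hf : PySem.Chars.isIn ['f', 'e', 'e', 'd', 'b', 'a', 'c', 'k'] (PySem.Chars.lower t.toList) <;>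
    simp [pvStepB, pvGet, pvPhraseToKey, pvMk, pvAssign, hf, h1, h2, h3, h4, h5, h6, h7, h8, h9, h10, h11, h12, h13, h14, h15, h16, h17, h18, h19, h20, h21, h22, h23]

/-- Unrolling B's fold: each entry accumulates an `any` over the tags. -/
theorem pvFoldB (L : List String) (b1 b2 b3 b4 b5 b6 b7 b8 b9 b10 b11 : Bool) :
    L.foldl pvStepB (pvMk b1 b2 b3 b4 b5 b6 b7 b8 b9 b10 b11) =
      pvMk (b1 || L.any (fun t => PySem.Str.lower t == "helpful" || PySem.Str.lower t == "super helpful"))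
           (b2 || L.any (fun t => PySem.Str.lower t == "tough" || PySem.Str.lower t == "difficult" || PySem.Str.lower t == "challenging"))
           (b3 || L.any (fun t => PySem.Str.isIn "feedback" (PySem.Str.lower t)))
           (b4 || L.any (fun t => PySem.Str.lower t == "lots of homework" || PySem.Str.lower t == "heavy workload"))
           (b5 || L.any (fun t => PySem.Str.lower t == "clear grading" || PySem.Str.lower t == "fair grading"))
           (b6 || L.any (fun t => PySem.Str.lower t == "caring" || PySem.Str.lower t == "compassionate" || PySem.Str.lower t == "understanding"))
           (b7 || L.any (fun t => PySem.Str.lower t == "respected" || PySem.Str.lower t == "respected professor"))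
           (b8 || L.any (fun t => PySem.Str.lower t == "inspirational" || PySem.Str.lower t == "inspiring"))
           (b9 || L.any (fun t => PySem.Str.lower t == "skip class" || PySem.Str.lower t == "skip" || PySem.Str.lower t == "attendance not mandatory"))
           (b10 || L.any (fun t => PySem.Str.lower t == "tough grader" || PySem.Str.lower t == "hard grader"))
           (b11 || L.any (fun t => PySem.Str.lower t == "get ready to read" || PySem.Str.lower t == "lots of reading")) := by
  induction L generalizing b1 b2 b3 b4 b5 b6 b7 b8 b9 b10 b11 with
  | nil => simp [pvMk]
  | cons t L ih =>
    rw [List.foldl_cons, pvStepB_mk, ih]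
    simp only [List.any_cons, pvMk, Bool.or_assoc]

theorem pvBeqComm (a b : String) : (a == b) = (b == a) := by
  rw [Bool.eq_iff_iff]
  simp only [beq_iff_eq]
  exact eq_comm

/-- A membership scan over the lowered tags, phrase by phrase, is a single `any`. -/
theorem pvContainsLower (L : List String) (p : String) :
    (L.map PySem.Str.lower).contains p = L.any (fun t => PySem.Str.lower t == p) := by
  induction L with
  | nil => rfl
  | cons t L ih => simp only [List.map_cons, List.contains_cons, List.any_cons, ih, pvBeqComm]

/-- Distributing `any` over a disjunction of predicates. -/
theorem pvAnyOr (L : List String) (f g : String → Bool) :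
    (L.any f || L.any g) = L.any (fun t => f t || g t) := by
  induction L with
  | nil => rfl
  | cons t L ih =>
    simp only [List.any_cons, ← ih]
    cases f t <;> cases g t <;> simp

theorem pvA1 (c : Bool) (b1 b2 b3 b4 b5 b6 b7 b8 b9 b10 b11 : Bool) :
    (if c then pvAssign [("is_helpful", b1), ("is_tough", b2), ("gives_feedback", b3), ("lots_of_homework", b4), ("clear_grading", b5), ("caring", b6), ("respected", b7), ("inspirational", b8), ("skip_class", b9), ("tough_grader", b10), ("get_ready_to_read", b11)] "is_helpful" true else [("is_helpful", b1), ("is_tough", b2), ("gives_feedback", b3), ("lots_of_homework", b4), ("clear_grading", b5), ("caring", b6), ("respected", b7), ("inspirational", b8), ("skip_class", b9), ("tough_grader", b10), ("get_ready_to_read", b11)]) = [("is_helpful", b1 || c), ("is_tough", b2), ("gives_feedback", b3), ("lots_of_homework", b4), ("clear_grading", b5), ("caring", b6), ("respected", b7), ("inspirational", b8), ("skip_class", b9), ("tough_grader", b10), ("get_ready_to_read", b11)] := by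
  cases c <;> simp [pvAssign]

theorem pvA2 (c : Bool) (b1 b2 b3 b4 b5 b6 b7 b8 b9 b10 b11 : Bool) :
    (if c then pvAssign [("is_helpful", b1), ("is_tough", b2), ("gives_feedback", b3), ("lots_of_homework", b4), ("clear_grading", b5), ("caring", b6), ("respected", b7), ("inspirational", b8), ("skip_class", b9), ("tough_grader", b10), ("get_ready_to_read", b11)] "is_tough" true else [("is_helpful", b1), ("is_tough", b2), ("gives_feedback", b3), ("lots_of_homework", b4), ("clear_grading", b5), ("caring", b6), ("respected", b7), ("inspirational", b8), ("skip_class", b9), ("tough_grader", b10), ("get_ready_to_read", b11)]) = [("is_helpful", b1), ("is_tough", b2 || c), ("gives_feedback", b3), ("lots_of_homework", b4), ("clear_grading", b5), ("caring", b6), ("respected", b7), ("inspirational", b8), ("skip_class", b9), ("tough_grader", b10), ("get_ready_to_read", b11)] := by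
  cases c <;> simp [pvAssign]

theorem pvA3 (c : Bool) (b1 b2 b3 b4 b5 b6 b7 b8 b9 b10 b11 : Bool) :
    (if c then pvAssign [("is_helpful", b1), ("is_tough", b2), ("gives_feedback", b3), ("lots_of_homework", b4), ("clear_grading", b5), ("caring", b6), ("respected", b7), ("inspirational", b8), ("skip_class", b9), ("tough_grader", b10), ("get_ready_to_read", b11)] "gives_feedback" true else [("is_helpful", b1), ("is_tough", b2), ("gives_feedback", b3), ("lots_of_homework", b4), ("clear_grading", b5), ("caring", b6), ("respected", b7), ("inspirational", b8), ("skip_class", b9), ("tough_grader", b10), ("get_ready_to_read", b11)]) = [("is_helpful", b1), ("is_tough", b2), ("gives_feedback", b3 || c), ("lots_of_homework", b4), ("clear_grading", b5), ("caring", b6), ("respected", b7), ("inspirational", b8), ("skip_class", b9), ("tough_grader", b10), ("get_ready_to_read", b11)] := by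
  cases c <;> simp [pvAssign]

theorem pvA4 (c : Bool) (b1 b2 b3 b4 b5 b6 b7 b8 b9 b10 b11 : Bool) :
    (if c then pvAssign [("is_helpful", b1), ("is_tough", b2), ("gives_feedback", b3), ("lots_of_homework", b4), ("clear_grading", b5), ("caring", b6), ("respected", b7), ("inspirational", b8), ("skip_class", b9), ("tough_grader", b10), ("get_ready_to_read", b11)] "lots_of_homework" true else [("is_helpful", b1), ("is_tough", b2), ("gives_feedback", b3), ("lots_of_homework", b4), ("clear_grading", b5), ("caring", b6), ("respected", b7), ("inspirational", b8), ("skip_class", b9), ("tough_grader", b10), ("get_ready_to_read", b11)]) = [("is_helpful", b1), ("is_tough", b2), ("gives_feedback", b3), ("lots_of_homework", b4 || c), ("clear_grading", b5), ("caring", b6), ("respected", b7), ("inspirational", b8), ("skip_class", b9), ("tough_grader", b10), ("get_ready_to_read", b11)] := by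
  cases c <;> simp [pvAssign]

theorem pvA5 (c : Bool) (b1 b2 b3 b4 b5 b6 b7 b8 b9 b10 b11 : Bool) :
    (if c then pvAssign [("is_helpful", b1), ("is_tough", b2), ("gives_feedback", b3), ("lots_of_homework", b4), ("clear_grading", b5), ("caring", b6), ("respected", b7), ("inspirational", b8), ("skip_class", b9), ("tough_grader", b10), ("get_ready_to_read", b11)] "clear_grading" true else [("is_helpful", b1), ("is_tough", b2), ("gives_feedback", b3), ("lots_of_homework", b4), ("clear_grading", b5), ("caring", b6), ("respected", b7), ("inspirational", b8), ("skip_class", b9), ("tough_grader", b10), ("get_ready_to_read", b11)]) = [("is_helpful", b1), ("is_tough", b2), ("gives_feedback", b3), ("lots_of_homework", b4), ("clear_grading", b5 || c), ("caring", b6), ("respected", b7), ("inspirational", b8), ("skip_class", b9), ("tough_grader", b10), ("get_ready_to_read", b11)] := by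
  cases c <;> simp [pvAssign]

theorem pvA6 (c : Bool) (b1 b2 b3 b4 b5 b6 b7 b8 b9 b10 b11 : Bool) :
    (if c then pvAssign [("is_helpful", b1), ("is_tough", b2), ("gives_feedback", b3), ("lots_of_homework", b4), ("clear_grading", b5), ("caring", b6), ("respected", b7), ("inspirational", b8), ("skip_class", b9), ("tough_grader", b10), ("get_ready_to_read", b11)] "caring" true else [("is_helpful", b1), ("is_tough", b2), ("gives_feedback", b3), ("lots_of_homework", b4), ("clear_grading", b5), ("caring", b6), ("respected", b7), ("inspirational", b8), ("skip_class", b9), ("tough_grader", b10), ("get_ready_to_read", b11)]) = [("is_helpful", b1), ("is_tough", b2), ("gives_feedback", b3), ("lots_of_homework", b4), ("clear_grading", b5), ("caring", b6 || c), ("respected", b7), ("inspirational", b8), ("skip_class", b9), ("tough_grader", b10), ("get_ready_to_read", b11)] := by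
  cases c <;> simp [pvAssign]

theorem pvA7 (c : Bool) (b1 b2 b3 b4 b5 b6 b7 b8 b9 b10 b11 : Bool) :
    (if c then pvAssign [("is_helpful", b1), ("is_tough", b2), ("gives_feedback", b3), ("lots_of_homework", b4), ("clear_grading", b5), ("caring", b6), ("respected", b7), ("inspirational", b8), ("skip_class", b9), ("tough_grader", b10), ("get_ready_to_read", b11)] "respected" true else [("is_helpful", b1), ("is_tough", b2), ("gives_feedback", b3), ("lots_of_homework", b4), ("clear_grading", b5), ("caring", b6), ("respected", b7), ("inspirational", b8), ("skip_class", b9), ("tough_grader", b10), ("get_ready_to_read", b11)]) = [("is_helpful", b1), ("is_tough", b2), ("gives_feedback", b3), ("lots_of_homework", b4), ("clear_grading", b5), ("caring", b6), ("respected", b7 || c), ("inspirational", b8), ("skip_class", b9), ("tough_grader", b10), ("get_ready_to_read", b11)] := by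
  cases c <;> simp [pvAssign]

theorem pvA8 (c : Bool) (b1 b2 b3 b4 b5 b6 b7 b8 b9 b10 b11 : Bool) :
    (if c then pvAssign [("is_helpful", b1), ("is_tough", b2), ("gives_feedback", b3), ("lots_of_homework", b4), ("clear_grading", b5), ("caring", b6), ("respected", b7), ("inspirational", b8), ("skip_class", b9), ("tough_grader", b10), ("get_ready_to_read", b11)] "inspirational" true else [("is_helpful", b1), ("is_tough", b2), ("gives_feedback", b3), ("lots_of_homework", b4), ("clear_grading", b5), ("caring", b6), ("respected", b7), ("inspirational", b8), ("skip_class", b9), ("tough_grader", b10), ("get_ready_to_read", b11)]) = [("is_helpful", b1), ("is_tough", b2), ("gives_feedback", b3), ("lots_of_homework", b4), ("clear_grading", b5), ("caring", b6), ("respected", b7), ("inspirational", b8 || c), ("skip_class", b9), ("tough_grader", b10), ("get_ready_to_read", b11)] := by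
  cases c <;> simp [pvAssign]

theorem pvA9 (c : Bool) (b1 b2 b3 b4 b5 b6 b7 b8 b9 b10 b11 : Bool) :
    (if c then pvAssign [("is_helpful", b1), ("is_tough", b2), ("gives_feedback", b3), ("lots_of_homework", b4), ("clear_grading", b5), ("caring", b6), ("respected", b7), ("inspirational", b8), ("skip_class", b9), ("tough_grader", b10), ("get_ready_to_read", b11)] "skip_class" true else [("is_helpful", b1), ("is_tough", b2), ("gives_feedback", b3), ("lots_of_homework", b4), ("clear_grading", b5), ("caring", b6), ("respected", b7), ("inspirational", b8), ("skip_class", b9), ("tough_grader", b10), ("get_ready_to_read", b11)]) = [("is_helpful", b1), ("is_tough", b2), ("gives_feedback", b3), ("lots_of_homework", b4), ("clear_grading", b5), ("caring", b6), ("respected", b7), ("inspirational", b8), ("skip_class", b9 || c), ("tough_grader", b10), ("get_ready_to_read", b11)] := by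
  cases c <;> simp [pvAssign]

theorem pvA10 (c : Bool) (b1 b2 b3 b4 b5 b6 b7 b8 b9 b10 b11 : Bool) :
    (if c then pvAssign [("is_helpful", b1), ("is_tough", b2), ("gives_feedback", b3), ("lots_of_homework", b4), ("clear_grading", b5), ("caring", b6), ("respected", b7), ("inspirational", b8), ("skip_class", b9), ("tough_grader", b10), ("get_ready_to_read", b11)] "tough_grader" true else [("is_helpful", b1), ("is_tough", b2), ("gives_feedback", b3), ("lots_of_homework", b4), ("clear_grading", b5), ("caring", b6), ("respected", b7), ("inspirational", b8), ("skip_class", b9), ("tough_grader", b10), ("get_ready_to_read", b11)]) = [("is_helpful", b1), ("is_tough", b2), ("gives_feedback", b3), ("lots_of_homework", b4), ("clear_grading", b5), ("caring", b6), ("respected", b7), ("inspirational", b8), ("skip_class", b9), ("tough_grader", b10 || c), ("get_ready_to_read", b11)] := by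
  cases c <;> simp [pvAssign]

theorem pvA11 (c : Bool) (b1 b2 b3 b4 b5 b6 b7 b8 b9 b10 b11 : Bool) :
    (if c then pvAssign [("is_helpful", b1), ("is_tough", b2), ("gives_feedback", b3), ("lots_of_homework", b4), ("clear_grading", b5), ("caring", b6), ("respected", b7), ("inspirational", b8), ("skip_class", b9), ("tough_grader", b10), ("get_ready_to_read", b11)] "get_ready_to_read" true else [("is_helpful", b1), ("is_tough", b2), ("gives_feedback", b3), ("lots_of_homework", b4), ("clear_grading", b5), ("caring", b6), ("respected", b7), ("inspirational", b8), ("skip_class", b9), ("tough_grader", b10), ("get_ready_to_read", b11)]) = [("is_helpful", b1), ("is_tough", b2), ("gives_feedback", b3), ("lots_of_homework", b4), ("clear_grading", b5), ("caring", b6), ("respected", b7), ("inspirational", b8), ("skip_class", b9), ("tough_grader", b10), ("get_ready_to_read", b11 || c)] := by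
  cases c <;> simp [pvAssign]

-- ===== VERDICT (by name: the statement is the Claim_ definition above) =====
theorem extract_tag_features_spec : Claim_equal_extract_tag_features := by
  intro L _
  show extract_tag_features L = extract_tag_features_alt L
  have hB : extract_tag_features_alt L =
      pvMk (L.any (fun t => PySem.Str.lower t == "helpful" || PySem.Str.lower t == "super helpful"))
           (L.any (fun t => PySem.Str.lower t == "tough" || PySem.Str.lower t == "difficult" || PySem.Str.lower t == "challenging"))
           (L.any (fun t => PySem.Str.isIn "feedback" (PySem.Str.lower t)))
           (L.any (fun t => PySem.Str.lower t == "lots of homework" || PySem.Str.lower t == "heavy workload"))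
           (L.any (fun t => PySem.Str.lower t == "clear grading" || PySem.Str.lower t == "fair grading"))
           (L.any (fun t => PySem.Str.lower t == "caring" || PySem.Str.lower t == "compassionate" || PySem.Str.lower t == "understanding"))
           (L.any (fun t => PySem.Str.lower t == "respected" || PySem.Str.lower t == "respected professor"))
           (L.any (fun t => PySem.Str.lower t == "inspirational" || PySem.Str.lower t == "inspiring"))
           (L.any (fun t => PySem.Str.lower t == "skip class" || PySem.Str.lower t == "skip" || PySem.Str.lower t == "attendance not mandatory"))
           (L.any (fun t => PySem.Str.lower t == "tough grader" || PySem.Str.lower t == "hard grader"))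
           (L.any (fun t => PySem.Str.lower t == "get ready to read" || PySem.Str.lower t == "lots of reading")) := by
    have h := pvFoldB L false false false false false false false false false false false
    simpa [extract_tag_features_alt, pvKeys, pvMk] using h
  rw [hB]
  simp only [extract_tag_features, pvA1, pvA2, pvA3, pvA4, pvA5, pvA6, pvA7, pvA8, pvA9,
    pvA10, pvA11, Bool.false_or, List.any_cons, List.any_nil, Bool.or_false, pvContainsLower,
    List.any_map, Function.comp_def, pvAnyOr, Bool.or_assoc, pvMk]
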